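-- pv_equiv track=rewrite | github.com/neko-kyuu/my-playground-sandbox | MCP/obsidian_graphrag_mcp/server.py | _expand_sources
-- ===== SOURCE A (Python) =====
-- from collections import deque
-- from typing import Any, Dict, List, Optional, Set, Tuple, Literal, Union
--
-- def _expand_sources(
--     graph_edges: Dict[str, List[str]],
--     graph_inbound_edges: Dict[str, List[str]],
--     seeds: Set[str],
--     hops: int,
--     direction: Literal["out", "in", "both"] = "both",
-- ) -> Set[str]:
--     if hops <= 0:
--         return set(seeds)
--
--     seen = set(seeds)
--     q: deque[Tuple[str, int]] = deque([(s, 0) for s in seeds])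
--
--     while q:
--         s, d = q.popleft()
--         if d >= hops:
--             continue
--
--         out_nbrs = graph_edges.get(s, []) or []
--         in_nbrs = graph_inbound_edges.get(s, []) or []
--
--         if direction == "out":
--             candidates = out_nbrs
--         elif direction == "in":
--             candidates = in_nbrs
--         else:
--             candidates = list(out_nbrs) + list(in_nbrs)
--
--         for nb in candidates:
--             if nb not in seen:
--                 seen.add(nb)
--                 q.append((nb, d + 1))
--
--     return seen
-- ===== SOURCE B (Python) =====
-- def _expand_sources(graph_edges, graph_inbound_edges, seeds, hops, direction="both"):
--     def neighbors(s):
--         out_nbrs = graph_edges.get(s, []) or []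
--         in_nbrs = graph_inbound_edges.get(s, []) or []
--         if direction == "out":
--             return out_nbrs
--         if direction == "in":
--             return in_nbrs
--         return list(out_nbrs) + list(in_nbrs)
--
--     def saturate(cur, k):
--         # one saturation round: adjoin the whole out-neighbourhood of cur
--         if k <= 0:
--             return cur
--         ext = set(cur)
--         for s in cur:
--             ext.update(neighbors(s))
--         if len(ext) == len(cur):  # fixed point reached: nothing new this round
--             return cur
--         return saturate(ext, k - 1)
--
--     return saturate(set(seeds), hops)
-- ===== Notes on version B (the rewrite author's own statement) =====
-- stated objective: alternative
-- what changed: Replaced the depth-tagged FIFO-deque BFS by a recursive fixed-point saturation: each of at most `hops` rounds rescans the ENTIRE current set and adjoins its whole one-step neighbourhood, stopping when a round is a fixed point; there is no queue, no frontier and no per-node depth bookkeeping.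
import Mathlib
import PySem

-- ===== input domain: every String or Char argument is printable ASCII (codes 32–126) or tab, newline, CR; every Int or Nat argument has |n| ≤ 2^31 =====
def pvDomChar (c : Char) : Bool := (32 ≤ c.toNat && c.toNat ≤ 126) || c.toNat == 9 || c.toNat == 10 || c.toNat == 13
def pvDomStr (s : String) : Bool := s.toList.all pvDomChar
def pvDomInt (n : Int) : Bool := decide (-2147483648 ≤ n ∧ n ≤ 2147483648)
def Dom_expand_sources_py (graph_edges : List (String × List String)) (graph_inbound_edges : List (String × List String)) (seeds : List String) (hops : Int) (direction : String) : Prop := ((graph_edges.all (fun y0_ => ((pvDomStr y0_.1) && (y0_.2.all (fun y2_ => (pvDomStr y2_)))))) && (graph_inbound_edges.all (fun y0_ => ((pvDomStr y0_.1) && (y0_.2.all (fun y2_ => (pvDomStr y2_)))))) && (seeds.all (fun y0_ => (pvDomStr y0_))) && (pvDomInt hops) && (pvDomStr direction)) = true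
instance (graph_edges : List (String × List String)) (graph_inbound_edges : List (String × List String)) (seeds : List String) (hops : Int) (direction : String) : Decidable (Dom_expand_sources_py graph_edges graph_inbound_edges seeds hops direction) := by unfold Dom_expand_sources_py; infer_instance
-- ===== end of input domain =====

-- B replaces A's depth-tagged FIFO-deque BFS by a recursive fixed-point saturation that each
-- round rescans the entire current set and adjoins its whole one-step neighbourhood, stopping
-- at a fixed point — no queue, frontier or depth bookkeeping (alternative decomposition).

-- ===== PORT A =====
-- all strings ever added to `seen` beyond the seeds come from the dicts' value lists
def pvU (ge gi : List (String × List String)) : List String :=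
  (ge.map Prod.snd).flatten ++ (gi.map Prod.snd).flatten

-- termination helper: a value returned by dict.get(s, []) lies in the flattened values
theorem pv_mem_getD {d : List (String × List String)} {s x : String}
    (h : x ∈ PySem.Dict.getD ⟨d⟩ s []) : x ∈ (d.map Prod.snd).flatten := by
  have h' : x ∈ ((List.find? (fun p => p.1 == s) d).map Prod.snd).getD [] := by
    simpa [PySem.Dict.getD, PySem.Dict.get?, PySem.Dict.items] using h
  cases hf : List.find? (fun p => p.1 == s) d with
  | none => rw [hf] at h'; simp at h'
  | some p =>
    rw [hf] at h'
    simp at h'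
    exact List.mem_flatten.mpr ⟨p.2, List.mem_map.mpr ⟨p, List.mem_of_find?_eq_some hf, rfl⟩, h'⟩

-- termination helper: removing one fresh element of U from the "unseen" count
theorem pv_countP_snoc (U : List String) (seen : List String) (a : String)
    (hU : a ∈ U) (hs : a ∉ seen) :
    U.countP (fun x => decide (x ∉ seen ++ [a])) + 1 ≤ U.countP (fun x => decide (x ∉ seen)) := by
  induction U with
  | nil => simp at hU
  | cons u U ih =>
    simp only [List.countP_cons]
    by_cases hua : u = a
    · subst hua
      have mono : U.countP (fun x => decide (x ∉ seen ++ [u])) ≤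
          U.countP (fun x => decide (x ∉ seen)) := by
        apply List.countP_mono_left
        intro x _ hx
        simp only [decide_eq_true_eq, List.mem_append, List.mem_singleton] at hx ⊢
        intro hxs; exact hx (Or.inl hxs)
      have e1 : (decide (u ∉ seen ++ [u])) = false := by simp
      have e2 : (decide (u ∉ seen)) = true := by simp [hs]
      rw [e1, e2, if_neg Bool.false_ne_true, if_pos rfl]
      omega
    · have ha : a ∈ U := by
        rcases List.mem_cons.mp hU with h | h
        · exact absurd h.symm hua
        · exact h
      have heq : (decide (u ∉ seen ++ [a])) = (decide (u ∉ seen)) := by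
        simp [hua]
      rw [heq]
      have := ih ha
      omega

-- the inner `for nb in candidates` loop of A
def pvAdd (d : Int) (st : List String × List (String × Int)) (cands : List String) :
    List String × List (String × Int) :=
  cands.foldl (fun st nb => if nb ∈ st.1 then st else (st.1 ++ [nb], st.2 ++ [(nb, d + 1)])) st

-- termination helper: one pvAdd pass never increases (unseen count + queue length)
theorem pv_pvAdd_measure (U : List String) :
    ∀ (cands seen : List String) (q : List (String × Int)) (d : Int),
      (∀ x ∈ cands, x ∈ U) →
      U.countP (fun x => decide (x ∉ (pvAdd d (seen, q) cands).1)) + (pvAdd d (seen, q) cands).2.length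
        ≤ U.countP (fun x => decide (x ∉ seen)) + q.length := by
  intro cands
  induction cands with
  | nil => intro seen q d _; simp [pvAdd]
  | cons nb cs ih =>
    intro seen q d hsub
    by_cases hm : nb ∈ seen
    · have key : pvAdd d (seen, q) (nb :: cs) = pvAdd d (seen, q) cs := by
        simp [pvAdd, hm]
      rw [key]
      exact ih seen q d (fun x hx => hsub x (List.mem_cons_of_mem _ hx))
    · have key : pvAdd d (seen, q) (nb :: cs)
          = pvAdd d (seen ++ [nb], q ++ [(nb, d + 1)]) cs := by
        simp [pvAdd, hm]
      rw [key]
      have h1 := ih (seen ++ [nb]) (q ++ [(nb, d + 1)]) d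
        (fun x hx => hsub x (List.mem_cons_of_mem _ hx))
      have h2 := pv_countP_snoc U seen nb (hsub nb List.mem_cons_self) hm
      simp only [List.length_append, List.length_cons, List.length_nil] at h1
      omega

-- the `while q` loop of A (queue of (node, depth) pairs)
def pvLoopA (ge gi : List (String × List String)) (hops : Int) (direction : String)
    (seen : List String) (q : List (String × Int)) : List String :=
  match q with
  | [] => seen
  | (s, d) :: rest =>
    if hops ≤ d then pvLoopA ge gi hops direction seen rest
    else
      let out_nbrs := PySem.Dict.getD ⟨ge⟩ s []
      let in_nbrs := PySem.Dict.getD ⟨gi⟩ s []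
      let candidates := if direction == "out" then out_nbrs
        else if direction == "in" then in_nbrs
        else out_nbrs ++ in_nbrs
      pvLoopA ge gi hops direction (pvAdd d (seen, rest) candidates).1 (pvAdd d (seen, rest) candidates).2
termination_by (PySem.List.dedup (pvU ge gi)).countP (fun x => decide (x ∉ seen)) + q.length
decreasing_by
  · simp only [List.length_cons]; omega
  · have hc : ∀ x ∈ (if direction == "out" then PySem.Dict.getD ⟨ge⟩ s []
        else if direction == "in" then PySem.Dict.getD ⟨gi⟩ s []
        else PySem.Dict.getD ⟨ge⟩ s [] ++ PySem.Dict.getD ⟨gi⟩ s []),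
        x ∈ PySem.List.dedup (pvU ge gi) := by
      intro x hx
      have hu : x ∈ pvU ge gi := by
        unfold pvU
        split at hx
        · exact List.mem_append_left _ (pv_mem_getD hx)
        · split at hx
          · exact List.mem_append_right _ (pv_mem_getD hx)
          · rcases List.mem_append.mp hx with h | h
            · exact List.mem_append_left _ (pv_mem_getD h)
            · exact List.mem_append_right _ (pv_mem_getD h)
      exact (PySem.List.mem_dedup _ _).mpr hu
    have := pv_pvAdd_measure (PySem.List.dedup (pvU ge gi)) _ seen rest d hc
    simp only [List.length_cons, dite_eq_ite]
    omega

def expand_sources_py (graph_edges : List (String × List String)) (graph_inbound_edges : List (String × List String)) (seeds : List String) (hops : Int) (direction : String) : List String :=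
  if hops ≤ 0 then PySem.Set.ofList seeds
  else pvLoopA graph_edges graph_inbound_edges hops direction
    (PySem.Set.ofList seeds) (seeds.map (fun s => (s, (0 : Int))))

-- ===== PORT B =====
-- Source B's local helper `neighbors`
def pvNbrs (ge gi : List (String × List String)) (direction : String) (s : String) : List String :=
  let out_nbrs := PySem.Dict.getD ⟨ge⟩ s []
  let in_nbrs := PySem.Dict.getD ⟨gi⟩ s []
  if direction == "out" then out_nbrs
  else if direction == "in" then in_nbrs
  else out_nbrs ++ in_nbrs

-- one saturation round of Source B: `ext = set(cur); for s in cur: ext.update(neighbors(s))`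
def pvSatRound (ge gi : List (String × List String)) (direction : String)
    (cur : List String) : List String :=
  cur.foldl (fun ext s => PySem.Set.update ext (pvNbrs ge gi direction s)) cur

-- Source B's recursive `saturate` (k ≤ 0 base case = fuel 0; the fixed-point test is the len check)
def pvSat (ge gi : List (String × List String)) (direction : String) :
    Nat → List String → List String
  | 0, cur => cur
  | Nat.succ fuel, cur =>
    let ext := pvSatRound ge gi direction cur
    if ext.length = cur.length then cur
    else pvSat ge gi direction fuel ext

def expand_sources_py_alt (graph_edges : List (String × List String)) (graph_inbound_edges : List (String × List String)) (seeds : List String) (hops : Int) (direction : String) : List String :=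
  pvSat graph_edges graph_inbound_edges direction hops.toNat (PySem.Set.ofList seeds)

-- ===== PRECONDITION & SPEC =====
-- Python's `seeds` is a set; under the type convention its List representation holds the
-- DISTINCT elements, so Pre_ only rules out non-canonical representations (duplicate entries),
-- no input the Python A runs on is excluded.
def Pre_expand_sources_py (graph_edges : List (String × List String)) (graph_inbound_edges : List (String × List String)) (seeds : List String) (hops : Int) (direction : String) : Prop :=
  seeds.Nodup
instance (graph_edges : List (String × List String)) (graph_inbound_edges : List (String × List String)) (seeds : List String) (hops : Int) (direction : String) : Decidable (Pre_expand_sources_py graph_edges graph_inbound_edges seeds hops direction) := by unfold Pre_expand_sources_py; infer_instance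

def pvWitness_expand_sources_py : (List (String × List String)) × (List (String × List String)) × List String × Int × String :=
  ([("a", ["b", "c"])], [("a", ["d"])], ["a"], 1, "both")

def Spec_expand_sources_py (graph_edges : List (String × List String)) (graph_inbound_edges : List (String × List String)) (seeds : List String) (hops : Int) (direction : String) (out : List String) : Prop := out = expand_sources_py_alt graph_edges graph_inbound_edges seeds hops direction
instance (graph_edges : List (String × List String)) (graph_inbound_edges : List (String × List String)) (seeds : List String) (hops : Int) (direction : String) (out : List String) : Decidable (Spec_expand_sources_py graph_edges graph_inbound_edges seeds hops direction out) := by unfold Spec_expand_sources_py; infer_instance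

-- ===== CLAIM (what is proved, stated in full; the proofs are below) =====
def Claim_equal_expand_sources_py : Prop := ∀ (graph_edges : List (String × List String)) (graph_inbound_edges : List (String × List String)) (seeds : List String) (hops : Int) (direction : String), Dom_expand_sources_py graph_edges graph_inbound_edges seeds hops direction → Pre_expand_sources_py graph_edges graph_inbound_edges seeds hops direction → Spec_expand_sources_py graph_edges graph_inbound_edges seeds hops direction (expand_sources_py graph_edges graph_inbound_edges seeds hops direction)

-- ===== LEMMAS AND PROOFS =====

-- proof-side intermediate: the fresh one-step discoveries out of a frontier F, in order
def pvLevelFrom (ge gi : List (String × List String)) (direction : String)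
    (seen nxt frontier : List String) : List String :=
  frontier.foldl (fun nxt s =>
    (pvNbrs ge gi direction s).foldl
      (fun nxt nb => if nb ∈ seen ∨ nb ∈ nxt then nxt else PySem.Set.add nxt nb) nxt) nxt

theorem pv_add_eq (s : List String) (x : String) :
    PySem.Set.add s x = if x ∈ s then s else s ++ [x] := by
  simp [PySem.Set.add]

-- folding Set.add over fresh, duplicate-free elements is plain append
theorem pv_foldl_add : ∀ (xs acc : List String), (∀ x ∈ xs, x ∉ acc) → xs.Nodup →
    xs.foldl PySem.Set.add acc = acc ++ xs := by
  intro xs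
  induction xs with
  | nil => intro acc _ _; simp
  | cons a t ih =>
    intro acc h hn
    have ha : a ∉ acc := h a List.mem_cons_self
    simp only [List.foldl_cons, pv_add_eq, if_neg ha]
    rw [ih (acc ++ [a])]
    · simp
    · intro x hx
      simp only [List.mem_append, List.mem_singleton]
      rintro (h1 | h1)
      · exact h x (List.mem_cons_of_mem _ hx) h1
      · exact (List.nodup_cons.mp hn).1 (h1 ▸ hx)
    · exact (List.nodup_cons.mp hn).2

theorem pv_ofList_nodup (xs : List String) (h : xs.Nodup) : PySem.Set.ofList xs = xs := by
  have := pv_foldl_add xs [] (by simp) h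
  simpa [PySem.Set.ofList, PySem.Set.empty] using this

-- A's inner candidate loop from state (seen0 ++ nxt) equals the conditional-add inner loop
theorem pv_inner_bridge (seen0 : List String) :
    ∀ (cands nxt : List String) (q : List (String × Int)) (d : Int),
    ∃ t : List String,
      cands.foldl (fun nxt nb => if nb ∈ seen0 ∨ nb ∈ nxt then nxt else PySem.Set.add nxt nb) nxt
        = nxt ++ t ∧
      pvAdd d (seen0 ++ nxt, q) cands
        = (seen0 ++ (nxt ++ t), q ++ t.map (fun x => (x, d + 1))) ∧
      (∀ x ∈ t, x ∉ seen0 ∧ x ∉ nxt) ∧ t.Nodup := by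
  intro cands
  induction cands with
  | nil => intro nxt q d; exact ⟨[], by simp, by simp [pvAdd], by simp, List.nodup_nil⟩
  | cons nb cs ih =>
    intro nxt q d
    by_cases h0 : nb ∈ seen0 ∨ nb ∈ nxt
    · have hmem : nb ∈ seen0 ++ nxt := List.mem_append.mpr h0
      obtain ⟨t, h1, h2, h3, h4⟩ := ih nxt q d
      refine ⟨t, ?_, ?_, h3, h4⟩
      · simp only [List.foldl_cons]; rw [if_pos h0]; exact h1
      · have key : pvAdd d (seen0 ++ nxt, q) (nb :: cs) = pvAdd d (seen0 ++ nxt, q) cs := by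
          simp [pvAdd, hmem]
        rw [key]; exact h2
    · have hs0 : nb ∉ seen0 := fun h => h0 (Or.inl h)
      have hnx : nb ∉ nxt := fun h => h0 (Or.inr h)
      have hmem : nb ∉ seen0 ++ nxt := by
        simp only [List.mem_append]; rintro (h | h); exacts [hs0 h, hnx h]
      obtain ⟨t, h1, h2, h3, h4⟩ := ih (nxt ++ [nb]) (q ++ [(nb, d + 1)]) d
      refine ⟨nb :: t, ?_, ?_, ?_, ?_⟩
      · simp only [List.foldl_cons]
        rw [if_neg h0, pv_add_eq, if_neg hnx, h1]
        simp
      · have key : pvAdd d (seen0 ++ nxt, q) (nb :: cs)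
            = pvAdd d (seen0 ++ (nxt ++ [nb]), q ++ [(nb, d + 1)]) cs := by
          simp [pvAdd, hmem, List.append_assoc]
        rw [key, h2]
        simp
      · intro x hx
        rcases List.mem_cons.mp hx with h | h
        · subst h; exact ⟨hs0, hnx⟩
        · have := h3 x h
          refine ⟨this.1, fun hxn => this.2 (List.mem_append_left _ hxn)⟩
      · refine List.nodup_cons.mpr ⟨fun hnb => ?_, h4⟩
        exact (h3 nb hnb).2 (List.mem_append_right _ (by simp))

-- nodes still queued at depth ≥ hops contribute nothing
theorem pv_skip (ge gi : List (String × List String)) (hops : Int) (direction : String) :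
    ∀ (q : List (String × Int)) (seen : List String), (∀ p ∈ q, hops ≤ p.2) →
    pvLoopA ge gi hops direction seen q = seen := by
  intro q
  induction q with
  | nil => intro seen _; rw [pvLoopA]
  | cons p rest ih =>
    intro seen h
    obtain ⟨s, d⟩ := p
    rw [pvLoopA]
    simp only [if_pos (h (s, d) List.mem_cons_self)]
    exact ih seen (fun p hp => h p (List.mem_cons_of_mem _ hp))

-- consuming one whole BFS level of A's queue discovers exactly pvLevelFrom
theorem pv_level_loop (ge gi : List (String × List String)) (hops : Int) (direction : String) :
    ∀ (F nxt seen0 : List String) (d : Int), ¬ hops ≤ d →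
    pvLoopA ge gi hops direction (seen0 ++ nxt)
        (F.map (fun s => (s, d)) ++ nxt.map (fun s => (s, d + 1)))
      = pvLoopA ge gi hops direction (seen0 ++ pvLevelFrom ge gi direction seen0 nxt F)
        ((pvLevelFrom ge gi direction seen0 nxt F).map (fun s => (s, d + 1))) := by
  intro F
  induction F with
  | nil => intro nxt seen0 d _; simp [pvLevelFrom]
  | cons s F' ih =>
    intro nxt seen0 d hd
    obtain ⟨t, h1, h2, _, _⟩ :=
      pv_inner_bridge seen0 (pvNbrs ge gi direction s) nxt
        (F'.map (fun s => (s, d)) ++ nxt.map (fun s => (s, d + 1))) d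
    have hlf : pvLevelFrom ge gi direction seen0 nxt (s :: F')
        = pvLevelFrom ge gi direction seen0 (nxt ++ t) F' := by
      unfold pvLevelFrom
      simp only [List.foldl_cons]
      rw [h1]
    rw [hlf]
    have hstep : pvLoopA ge gi hops direction (seen0 ++ nxt)
        ((s :: F').map (fun s => (s, d)) ++ nxt.map (fun s => (s, d + 1)))
        = pvLoopA ge gi hops direction (seen0 ++ (nxt ++ t))
          (F'.map (fun s => (s, d)) ++ (nxt ++ t).map (fun s => (s, d + 1))) := by
      rw [List.map_cons, List.cons_append, pvLoopA]
      simp only [if_neg hd]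
      have hcand : (if direction == "out" then PySem.Dict.getD ⟨ge⟩ s []
          else if direction == "in" then PySem.Dict.getD ⟨gi⟩ s []
          else PySem.Dict.getD ⟨ge⟩ s [] ++ PySem.Dict.getD ⟨gi⟩ s []) = pvNbrs ge gi direction s := rfl
      rw [hcand, h2]
      simp [List.map_append, List.append_assoc]
    rw [hstep]
    exact ih (nxt ++ t) seen0 d hd

-- Set.update does nothing when all the new elements are already present
theorem pv_update_of_subset : ∀ (cands ext : List String), (∀ x ∈ cands, x ∈ ext) →
    PySem.Set.update ext cands = ext := by
  intro cands
  induction cands with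
  | nil => intro ext _; rfl
  | cons c cs ih =>
    intro ext h
    have hc : PySem.Set.add ext c = ext := by
      rw [pv_add_eq, if_pos (h c List.mem_cons_self)]
    show (c :: cs).foldl PySem.Set.add ext = ext
    simp only [List.foldl_cons, hc]
    exact ih ext (fun x hx => h x (List.mem_cons_of_mem _ hx))

-- Set.update on a state cur ++ acc is the conditional-add fold on acc
theorem pv_update_shift : ∀ (cands cur acc : List String),
    PySem.Set.update (cur ++ acc) cands
      = cur ++ cands.foldl (fun nxt nb => if nb ∈ cur ∨ nb ∈ nxt then nxt else PySem.Set.add nxt nb) acc := by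
  intro cands
  induction cands with
  | nil => intro cur acc; rfl
  | cons nb cs ih =>
    intro cur acc
    show ((nb :: cs).foldl PySem.Set.add (cur ++ acc)) = _
    simp only [List.foldl_cons]
    by_cases h : nb ∈ cur ∨ nb ∈ acc
    · have hm : nb ∈ cur ++ acc := List.mem_append.mpr h
      have ha : PySem.Set.add (cur ++ acc) nb = cur ++ acc := by
        rw [pv_add_eq, if_pos hm]
      rw [ha]
      have hu : PySem.Set.update (cur ++ acc) cs = cs.foldl PySem.Set.add (cur ++ acc) := rfl
      rw [← hu, ih cur acc, if_pos h]
    · have hm : nb ∉ cur ++ acc := by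
        simp only [List.mem_append]; rintro (h1 | h1) <;> exact h (by tauto)
      have hacc : nb ∉ acc := fun h1 => h (Or.inr h1)
      have ha : PySem.Set.add (cur ++ acc) nb = cur ++ (acc ++ [nb]) := by
        rw [pv_add_eq, if_neg hm]; simp
      rw [ha]
      have hu : PySem.Set.update (cur ++ (acc ++ [nb])) cs
          = cs.foldl PySem.Set.add (cur ++ (acc ++ [nb])) := rfl
      rw [← hu, ih cur (acc ++ [nb]), if_neg h]
      have hb : PySem.Set.add acc nb = acc ++ [nb] := by
        rw [pv_add_eq, if_neg hacc]
      rw [hb]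

-- the processed prefix of a saturation round adds nothing
theorem pv_round_processed (ge gi : List (String × List String)) (direction : String) :
    ∀ (p ext : List String), (∀ s ∈ p, ∀ x ∈ pvNbrs ge gi direction s, x ∈ ext) →
    p.foldl (fun e s => PySem.Set.update e (pvNbrs ge gi direction s)) ext = ext := by
  intro p
  induction p with
  | nil => intro ext _; rfl
  | cons s p' ih =>
    intro ext h
    simp only [List.foldl_cons]
    rw [pv_update_of_subset _ _ (h s List.mem_cons_self)]
    exact ih ext (fun s' hs' => h s' (List.mem_cons_of_mem _ hs'))

-- the frontier part of a saturation round is exactly pvLevelFrom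
theorem pv_round_frontier (ge gi : List (String × List String)) (direction : String)
    (cur : List String) :
    ∀ (F acc : List String),
    F.foldl (fun ext s => PySem.Set.update ext (pvNbrs ge gi direction s)) (cur ++ acc)
      = cur ++ pvLevelFrom ge gi direction cur acc F := by
  intro F
  induction F with
  | nil => intro acc; simp [pvLevelFrom]
  | cons s F' ih =>
    intro acc
    simp only [List.foldl_cons]
    rw [pv_update_shift]
    rw [ih]
    rfl

-- a conditional-add fold only grows its accumulator
theorem pv_cond_mono (cur : List String) :
    ∀ (cands acc : List String) (x : String), x ∈ acc →
    x ∈ cands.foldl (fun nxt nb => if nb ∈ cur ∨ nb ∈ nxt then nxt else PySem.Set.add nxt nb) acc := by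
  intro cands
  induction cands with
  | nil => intro acc x hx; exact hx
  | cons nb cs ih =>
    intro acc x hx
    simp only [List.foldl_cons]
    by_cases h : nb ∈ cur ∨ nb ∈ acc
    · rw [if_pos h]; exact ih acc x hx
    · rw [if_neg h, pv_add_eq, if_neg (fun h1 => h (Or.inr h1))]
      exact ih _ x (List.mem_append_left _ hx)

-- every candidate ends up either in cur or in the conditional-add fold's result
theorem pv_cond_complete (cur : List String) :
    ∀ (cands acc : List String), ∀ x ∈ cands,
    x ∈ cur ∨ x ∈ cands.foldl (fun nxt nb => if nb ∈ cur ∨ nb ∈ nxt then nxt else PySem.Set.add nxt nb) acc := by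
  intro cands
  induction cands with
  | nil => intro acc x hx; simp at hx
  | cons nb cs ih =>
    intro acc x hx
    simp only [List.foldl_cons]
    rcases List.mem_cons.mp hx with hx | hx
    · subst hx
      by_cases h : x ∈ cur ∨ x ∈ acc
      · rcases h with h | h
        · exact Or.inl h
        · rw [if_pos (Or.inr h)]
          exact Or.inr (pv_cond_mono cur cs acc x h)
      · rw [if_neg h, pv_add_eq, if_neg (fun h1 => h (Or.inr h1))]
        exact Or.inr (pv_cond_mono cur cs _ x (List.mem_append_right _ (by simp)))
    · by_cases h : nb ∈ cur ∨ nb ∈ acc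
      · rw [if_pos h]; exact ih acc x hx
      · rw [if_neg h]; exact ih _ x hx

-- pvLevelFrom only grows its accumulator
theorem pv_levelFrom_mono (ge gi : List (String × List String)) (direction : String)
    (cur : List String) :
    ∀ (F acc : List String) (x : String), x ∈ acc →
    x ∈ pvLevelFrom ge gi direction cur acc F := by
  intro F
  induction F with
  | nil => intro acc x hx; exact hx
  | cons s F' ih =>
    intro acc x hx
    show x ∈ pvLevelFrom ge gi direction cur _ F'
    exact ih _ x (pv_cond_mono cur (pvNbrs ge gi direction s) acc x hx)

-- every neighbour of the frontier lands in cur or in the round's discoveries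
theorem pv_levelFrom_complete (ge gi : List (String × List String)) (direction : String)
    (cur : List String) :
    ∀ (F acc : List String), ∀ s ∈ F, ∀ x ∈ pvNbrs ge gi direction s,
    x ∈ cur ∨ x ∈ pvLevelFrom ge gi direction cur acc F := by
  intro F
  induction F with
  | nil => intro acc s hs; simp at hs
  | cons s0 F' ih =>
    intro acc s hs x hx
    rcases List.mem_cons.mp hs with hs | hs
    · subst hs
      rcases pv_cond_complete cur (pvNbrs ge gi direction s) acc x hx with h | h
      · exact Or.inl h
      · exact Or.inr (pv_levelFrom_mono ge gi direction cur F' _ x h)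
    · exact ih _ s hs x hx

-- one saturation round from an invariant state: only the frontier contributes, in order
theorem pv_round_decomp (ge gi : List (String × List String)) (direction : String)
    (p F : List String)
    (h : ∀ s ∈ p, ∀ x ∈ pvNbrs ge gi direction s, x ∈ p ++ F) :
    pvSatRound ge gi direction (p ++ F)
      = (p ++ F) ++ pvLevelFrom ge gi direction (p ++ F) [] F := by
  unfold pvSatRound
  rw [List.foldl_append]
  rw [pv_round_processed ge gi direction p (p ++ F) h]
  have := pv_round_frontier ge gi direction (p ++ F) F []
  simpa using this

-- main induction: A's queue holding one full level equals B's remaining saturation rounds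
theorem pv_main (ge gi : List (String × List String)) (hops : Int) (direction : String) :
    ∀ (n : Nat) (d : Int) (p F : List String),
    (∀ s ∈ p, ∀ x ∈ pvNbrs ge gi direction s, x ∈ p ++ F) → d + n = hops →
    pvLoopA ge gi hops direction (p ++ F) (F.map (fun s => (s, d)))
      = pvSat ge gi direction n (p ++ F) := by
  intro n
  induction n with
  | zero =>
    intro d p F _ hdn
    rw [pvSat]
    apply pv_skip
    intro q hq
    obtain ⟨x, _, hx⟩ := List.mem_map.mp hq
    have : q.2 = d := by rw [← hx]
    omega
  | succ n ih =>
    intro d p F hinv hdn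
    have hd : ¬ hops ≤ d := by omega
    set cur := p ++ F with hcur
    set t := pvLevelFrom ge gi direction cur [] F with ht
    have hstep := pv_level_loop ge gi hops direction F [] cur d hd
    simp only [List.map_nil, List.append_nil] at hstep
    rw [hstep, ← ht]
    have hround : pvSatRound ge gi direction cur = cur ++ t :=
      pv_round_decomp ge gi direction p F hinv
    rw [pvSat]
    simp only [hround]
    by_cases hT : t = []
    · rw [hT]
      simp only [List.append_nil, List.length_append, List.length_nil, Nat.add_zero, if_pos rfl]
      rw [hT] at *
      simp only [List.map_nil]
      rw [pvLoopA]
      simp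
    · have hlen : ¬ ((cur ++ t).length = cur.length) := by
        simp only [List.length_append]
        have : 0 < t.length := List.length_pos_of_ne_nil hT
        omega
      rw [if_neg hlen]
      have hinv' : ∀ s ∈ cur, ∀ x ∈ pvNbrs ge gi direction s, x ∈ cur ++ t := by
        intro s hs x hx
        rcases List.mem_append.mp hs with hsp | hsF
        · exact List.mem_append_left _ (hinv s hsp x hx)
        · rcases pv_levelFrom_complete ge gi direction cur F [] s hsF x hx with h | h
          · exact List.mem_append_left _ h
          · exact List.mem_append_right _ (ht ▸ h)
      have := ih (d + 1) cur t hinv' (by omega)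
      exact this

-- ===== VERDICT (by name: the statement is the Claim_ definition above) =====
theorem expand_sources_py_spec : Claim_equal_expand_sources_py := by
  intro ge gi seeds hops direction _ hpre
  unfold Spec_expand_sources_py expand_sources_py expand_sources_py_alt
  have hseeds : PySem.Set.ofList seeds = seeds := pv_ofList_nodup seeds hpre
  by_cases h0 : hops ≤ 0
  · have : hops.toNat = 0 := by omega
    rw [if_pos h0, this, pvSat]
  · rw [if_neg h0, hseeds]
    have hmain := pv_main ge gi hops direction hops.toNat 0 [] seeds
      (by intro s hs; simp at hs) (by omega)
    simpa using hmain
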